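-- pv_equiv track=rewrite | github.com/max-amb/nix-tree | nix-tree/decomposer.py | finding_equals_signs
-- ===== SOURCE A (Python) =====
-- def finding_equals_signs(file: list) -> list:
--     """Iterates through the file - split on spaces - to find the equals signs positions
--
--     Args:
--         file: list - The list containing the split configuration file
--
--     Returns:
--         locations: list - A list containing all the locations of the equals in the file
--
--     Note:
--         The tuples used in the locations list allow for the equals locations to be used when the file is split and
--         when it is not split
--     """
--     locations: list = []
--     char_location = 0
--     for i, phrase in enumerate(file):
--         char_location += len(phrase)
--         if phrase == "=":
--             locations.append((char_location, i))
--     return locations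
-- ===== SOURCE B (Python) =====
-- def finding_equals_signs(file: list) -> list:
--     """Two-pass: build an inclusive prefix-sum table of phrase lengths, then filter."""
--     prefix = []
--     total = 0
--     for phrase in file:
--         total += len(phrase)
--         prefix.append(total)
--     return [(c, i) for i, (phrase, c) in enumerate(zip(file, prefix)) if phrase == "="]
-- ===== Notes on version B (the rewrite author's own statement) =====
-- stated objective: alternative
-- what changed: Replaces A's single interleaved accumulate-and-test loop by a build pass that materializes an inclusive prefix-sum table of phrase lengths followed by a separate zip/enumerate filter pass.
import Mathlib
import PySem

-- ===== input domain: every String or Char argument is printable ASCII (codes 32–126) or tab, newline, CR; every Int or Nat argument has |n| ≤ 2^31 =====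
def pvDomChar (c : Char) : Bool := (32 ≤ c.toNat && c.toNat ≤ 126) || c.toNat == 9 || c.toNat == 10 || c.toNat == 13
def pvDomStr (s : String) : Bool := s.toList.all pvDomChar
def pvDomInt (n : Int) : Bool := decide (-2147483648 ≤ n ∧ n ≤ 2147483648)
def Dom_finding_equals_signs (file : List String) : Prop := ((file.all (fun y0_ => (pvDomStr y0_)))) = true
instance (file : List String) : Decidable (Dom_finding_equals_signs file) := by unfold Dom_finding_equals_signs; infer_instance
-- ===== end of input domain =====

-- B replaces A's interleaved accumulate-and-test loop by a prefix-sum build pass plus a separate zip/enumerate filter pass (alternative decomposition, same cost).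


-- ===== PORT A =====
def finding_equals_signs (file : List String) : List (Int × Int) :=
  ((PySem.List.enumerate file 0).foldl
    (fun (st : List (Int × Int) × Int) ip =>
      let c := st.2 + PySem.Str.len ip.2
      (if ip.2 = "=" then st.1 ++ [(c, ip.1)] else st.1, c))
    ([], 0)).1

-- ===== PORT B =====
def finding_equals_signs_alt (file : List String) : List (Int × Int) :=
  let pre := (file.foldl (fun (st : List Int × Int) p =>
      let t := st.2 + PySem.Str.len p
      (st.1 ++ [t], t)) ([], 0)).1
  (PySem.List.enumerate (file.zip pre) 0).filterMap
    (fun x => if x.2.1 = "=" then some (x.2.2, x.1) else none)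

-- ===== PRECONDITION & SPEC =====
def Spec_finding_equals_signs (file : List String) (out : List (Int × Int)) : Prop := out = finding_equals_signs_alt file
instance (file : List String) (out : List (Int × Int)) : Decidable (Spec_finding_equals_signs file out) := by unfold Spec_finding_equals_signs; infer_instance

-- ===== CLAIM (what is proved, stated in full; the proofs are below) =====
def Claim_equal_finding_equals_signs : Prop := ∀ (file : List String), Dom_finding_equals_signs file → Spec_finding_equals_signs file (finding_equals_signs file)

-- ===== LEMMAS AND PROOFS =====

-- reference recursion: the list of (running char count, index) pairs at the '=' phrases
def pvSpecRec : List String → Int → Int → List (Int × Int)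
  | [], _, _ => []
  | p :: r, i, c =>
    (if p = "=" then [(c + PySem.Str.len p, i)] else []) ++ pvSpecRec r (i + 1) (c + PySem.Str.len p)

-- inclusive prefix sums of phrase lengths starting from t
def pvPreRec : List String → Int → List Int
  | [], _ => []
  | p :: r, t => (t + PySem.Str.len p) :: pvPreRec r (t + PySem.Str.len p)

theorem pvA_loop (file : List String) : ∀ (i c : Int) (acc : List (Int × Int)),
    ((PySem.List.enumerate file i).foldl
      (fun (st : List (Int × Int) × Int) ip =>
        let c := st.2 + PySem.Str.len ip.2
        (if ip.2 = "=" then st.1 ++ [(c, ip.1)] else st.1, c))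
      (acc, c)).1 = acc ++ pvSpecRec file i c := by
  induction file with
  | nil => intro i c acc; simp [pvSpecRec, PySem.List.enumerate_nil]
  | cons p r ih =>
    intro i c acc
    simp only [PySem.List.enumerate_cons, List.foldl_cons, pvSpecRec]
    rw [ih]
    by_cases hp : p = "=" <;> simp [hp, List.append_assoc]

theorem pvB_prefix (file : List String) : ∀ (t : Int) (acc : List Int),
    (file.foldl (fun (st : List Int × Int) p =>
      let t := st.2 + PySem.Str.len p
      (st.1 ++ [t], t)) (acc, t)).1 = acc ++ pvPreRec file t := by
  induction file with
  | nil => intro t acc; simp [pvPreRec]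
  | cons p r ih =>
    intro t acc
    simp only [List.foldl_cons, pvPreRec]
    rw [ih]
    simp [List.append_assoc]

theorem pvB_filter (file : List String) : ∀ (i c : Int),
    (PySem.List.enumerate (file.zip (pvPreRec file c)) i).filterMap
      (fun x => if x.2.1 = "=" then some (x.2.2, x.1) else none) = pvSpecRec file i c := by
  induction file with
  | nil => intro i c; simp [pvPreRec, pvSpecRec, PySem.List.enumerate_nil]
  | cons p r ih =>
    intro i c
    simp only [pvPreRec, List.zip_cons_cons, PySem.List.enumerate_cons, List.filterMap_cons,
      pvSpecRec]
    rw [ih]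
    by_cases hp : p = "=" <;> simp [hp]

-- ===== VERDICT (by name: the statement is the Claim_ definition above) =====
theorem finding_equals_signs_spec : Claim_equal_finding_equals_signs := by
  intro file _
  unfold Spec_finding_equals_signs finding_equals_signs finding_equals_signs_alt
  rw [pvA_loop, pvB_prefix]
  simp [pvB_filter]
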